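-- pv_equiv track=rewrite | github.com/chandrukannan99/bank | bank/crypto/rsa.py | one_line_format
-- ===== SOURCE A (Python) =====
-- def one_line_format(pem_key):
--     to_remove_strs = [
--         '-----BEGIN PUBLIC KEY-----',
--         '-----END PUBLIC KEY-----',
--         '-----BEGIN RSA PRIVATE KEY-----',
--         '-----END RSA PRIVATE KEY-----',
--         '\n',
--     ]
--
--     for to_remove in to_remove_strs:
--         pem_key = pem_key.replace(to_remove, '')
--
--     return pem_key
-- ===== SOURCE B (Python) =====
-- _MARKERS = (
--     '-----BEGIN PUBLIC KEY-----',
--     '-----END PUBLIC KEY-----',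
--     '-----BEGIN RSA PRIVATE KEY-----',
--     '-----END RSA PRIVATE KEY-----',
--     '\n',
-- )
--
--
-- def _strip_all(s, pat):
--     # one explicit left-to-right scan: skip the pattern where it starts, keep the char otherwise
--     out = []
--     i = 0
--     n = len(pat)
--     while i < len(s):
--         if s.startswith(pat, i):
--             i += n
--         else:
--             out.append(s[i])
--             i += 1
--     return ''.join(out)
--
--
-- def _strip_markers(s, pats):
--     if not pats:
--         return s
--     return _strip_markers(_strip_all(s, pats[0]), pats[1:])
--
--
-- def one_line_format(pem_key):
--     return _strip_markers(pem_key, _MARKERS)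
-- ===== Notes on version B (the rewrite author's own statement) =====
-- stated objective: alternative
-- what changed: Each of the five str.replace library calls is replaced by one explicit left-to-right scan that skips a marker where it starts and keeps the character otherwise, and the loop over the marker list becomes recursion over the tuple.
import Mathlib
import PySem

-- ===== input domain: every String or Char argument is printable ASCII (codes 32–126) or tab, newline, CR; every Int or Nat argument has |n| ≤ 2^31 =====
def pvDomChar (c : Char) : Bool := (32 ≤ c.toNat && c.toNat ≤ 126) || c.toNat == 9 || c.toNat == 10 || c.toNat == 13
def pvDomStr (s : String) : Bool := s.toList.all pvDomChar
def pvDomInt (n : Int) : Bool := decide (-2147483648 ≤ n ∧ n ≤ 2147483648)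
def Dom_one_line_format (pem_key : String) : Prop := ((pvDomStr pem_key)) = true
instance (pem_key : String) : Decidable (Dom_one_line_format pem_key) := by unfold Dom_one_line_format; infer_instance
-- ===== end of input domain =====

-- B replaces A's loop of str.replace calls by an explicit scan-and-skip remover recursing over the marker list (objective: alternative decomposition, same cost).

-- ===== PORT A =====
def one_line_format (pem_key : String) : String :=
  ["-----BEGIN PUBLIC KEY-----",
   "-----END PUBLIC KEY-----",
   "-----BEGIN RSA PRIVATE KEY-----",
   "-----END RSA PRIVATE KEY-----",
   "\n"].foldl (fun s r => PySem.Str.replace s r "") pem_key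

-- ===== PORT B =====
-- Source B's _strip_all while-loop: skip the pattern where it matches, keep the char otherwise.
-- 't.drop (pat.length - 1)' is the remainder after 'i += n' (exact for the nonempty patterns used here).
def pvStripAll (pat : List Char) : List Char → List Char
  | [] => []
  | c :: t =>
      if pat.isPrefixOf (c :: t) then pvStripAll pat (t.drop (pat.length - 1))
      else c :: pvStripAll pat t
termination_by l => l.length
decreasing_by all_goals simp

-- Source B's _strip_markers: recursion over the marker tuple.
def pvStripMarkers : List Char → List (List Char) → List Char
  | s, [] => s
  | s, p :: ps => pvStripMarkers (pvStripAll p s) ps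

def one_line_format_alt (pem_key : String) : String :=
  String.ofList (pvStripMarkers pem_key.toList
    ["-----BEGIN PUBLIC KEY-----".toList,
     "-----END PUBLIC KEY-----".toList,
     "-----BEGIN RSA PRIVATE KEY-----".toList,
     "-----END RSA PRIVATE KEY-----".toList,
     "\n".toList])

-- ===== PRECONDITION & SPEC =====
def Spec_one_line_format (pem_key : String) (out : String) : Prop := out = one_line_format_alt pem_key
instance (pem_key : String) (out : String) : Decidable (Spec_one_line_format pem_key out) := by unfold Spec_one_line_format; infer_instance

-- ===== CLAIM (what is proved, stated in full; the proofs are below) =====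
def Claim_equal_one_line_format : Prop := ∀ (pem_key : String), Dom_one_line_format pem_key → Spec_one_line_format pem_key (one_line_format pem_key)

-- ===== LEMMAS AND PROOFS =====

-- PySem's replace(old, '') is the same greedy left-to-right scan as pvStripAll, fuel made explicit.
theorem replace_go_eq (pat : List Char) (hpat : pat ≠ []) :
    ∀ (fuel : Nat) (l acc : List Char), l.length ≤ fuel →
      PySem.Chars.replace.go pat [] fuel l acc = acc.reverse ++ pvStripAll pat l := by
  intro fuel
  induction fuel with
  | zero =>
      intro l acc h
      have hl : l = [] := List.eq_nil_of_length_eq_zero (Nat.le_zero.mp h)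
      subst hl
      rw [PySem.Chars.replace.go.eq_def]
      simp [pvStripAll]
  | succ n ih =>
      intro l acc h
      cases l with
      | nil =>
          rw [PySem.Chars.replace.go.eq_def]
          simp [pvStripAll]
      | cons c t =>
          rw [PySem.Chars.replace.go.eq_def]
          simp only []
          rw [pvStripAll]
          by_cases hp : pat.isPrefixOf (c :: t) = true
          · simp only [hp, if_true]
            have hlen : pat.length - 1 + 1 = pat.length := Nat.succ_pred_eq_of_pos (List.length_pos_of_ne_nil hpat)
            have hdrop : (c :: t).drop pat.length = t.drop (pat.length - 1) := by
              rw [← hlen]; rfl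
            rw [hdrop]
            exact ih _ _ (by simp at h ⊢; omega) |>.trans (by simp)
          · simp only [hp, Bool.false_eq_true, if_false]
            rw [ih t (c :: acc) (by simp at h; omega)]
            simp

theorem replace_empty_eq (s pat : List Char) (hpat : pat ≠ []) :
    PySem.Chars.replace s pat [] = pvStripAll pat s := by
  unfold PySem.Chars.replace
  simp [List.isEmpty_iff, hpat, replace_go_eq pat hpat s.length s [] (le_refl _)]

theorem str_replace_empty (s r : String) (h : r.toList ≠ []) :
    PySem.Str.replace s r "" = String.ofList (pvStripAll r.toList s.toList) := by
  unfold PySem.Str.replace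
  rw [show ("" : String).toList = [] from rfl, replace_empty_eq _ _ h]

-- ===== VERDICT (by name: the statement is the Claim_ definition above) =====
theorem one_line_format_spec : Claim_equal_one_line_format := by
  intro pem_key _
  show one_line_format pem_key = one_line_format_alt pem_key
  unfold one_line_format one_line_format_alt
  simp only [List.foldl]
  rw [str_replace_empty _ _ (by decide), str_replace_empty _ _ (by decide),
      str_replace_empty _ _ (by decide), str_replace_empty _ _ (by decide),
      str_replace_empty _ _ (by decide)]
  simp [pvStripMarkers]
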